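-- pv_equiv track=rewrite | github.com/utkuden/jinsight | inference_ui_llm.py | extract_javadoc_sections
-- ===== SOURCE A (Python) =====
-- def extract_javadoc_sections(javadoc_text):
--     lines = javadoc_text.split("\n")
--     cleaned_lines = []
--     for line in lines:
--         line = line.lstrip(" *\t/")  # remove leading * or spaces
--         cleaned_lines.append(line)
--
--     summary_lines = []
--     param_blocks = []
--     return_blocks = []
--
--     current_section = "summary"
--     current_param = []
--     current_return = []
--     ignoring_throws = False
--
--     for line in cleaned_lines:
--         if line.startswith("@param"):
--             ignoring_throws = False
--
--             if current_section == "param" and current_param: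
--                 param_blocks.append(current_param)
--             if current_section == "return" and current_return:
--                 return_blocks.append(current_return)
--             current_section = "param"
--             current_param = []
--             param_line = line.replace("@param", "").strip()
--             current_param.append(param_line)
--
--         elif line.startswith("@return"):
--             ignoring_throws = False
--             # finalize old block
--             if current_section == "param" and current_param:
--                 param_blocks.append(current_param)
--             if current_section == "return" and current_return:
--                 return_blocks.append(current_return)
--             current_section = "return"
--             current_return = []
--             return_line = line.replace("@return", "").strip()
--             current_return.append(return_line)
--
--         elif line.startswith("@throws"):
--             ignoring_throws = True
--
--             if current_section == "param" and current_param: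
--                 param_blocks.append(current_param)
--             if current_section == "return" and current_return:
--                 return_blocks.append(current_return)
--             current_section = "throws"
--
--         else:
--             if ignoring_throws:
--                 continue
--             if current_section == "summary":
--                 summary_lines.append(line)
--             elif current_section == "param":
--                 current_param.append(line)
--             elif current_section == "return":
--                 current_return.append(line)
--             else:
--                 # throws section => ignore
--                 pass
--
--     if current_section == "param" and current_param:
--         param_blocks.append(current_param)
--     if current_section == "return" and current_return:
--         return_blocks.append(current_return)
--
--     summary_text = " ".join(summary_lines).strip()
--     param_texts = [" ".join(block).strip() for block in param_blocks]
--     return_texts = [" ".join(block).strip() for block in return_blocks]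
--
--     return summary_text, param_texts, return_texts
-- ===== SOURCE B (Python) =====
-- def extract_javadoc_sections(javadoc_text):
--     # Pass 1: clean lines, then chop them into tagged segments:
--     # an implicit leading "summary" segment, then one segment per @param/@return/@throws line.
--     cleaned = [line.lstrip(" *\t/") for line in javadoc_text.split("\n")]
--
--     segments = [("summary", [])]
--     for line in cleaned:
--         if line.startswith("@param"):
--             segments.append(("param", [line.replace("@param", "").strip()]))
--         elif line.startswith("@return"):
--             segments.append(("return", [line.replace("@return", "").strip()]))
--         elif line.startswith("@throws"):
--             segments.append(("throws", []))
--         else: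
--             segments[-1][1].append(line)
--
--     # Pass 2: fold the segment list into the three outputs; throws segments are dropped.
--     summary_text = ""
--     param_texts = []
--     return_texts = []
--     for kind, lines in segments:
--         text = " ".join(lines).strip()
--         if kind == "summary":
--             summary_text = text
--         elif kind == "param":
--             param_texts.append(text)
--         elif kind == "return":
--             return_texts.append(text)
--     return summary_text, param_texts, return_texts
-- ===== Notes on version B (the rewrite author's own statement) =====
-- stated objective: alternative
-- what changed: Replaces A's single per-line state machine (current_section/current_param/current_return/ignoring_throws with flush-on-tag bookkeeping) by two passes: first chop the cleaned lines into an explicit list of (kind, lines) segments headed by the @param/@return/@throws tag lines, then fold that segment list into summary/param/return outputs, dropping throws segments.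
import Mathlib
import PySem

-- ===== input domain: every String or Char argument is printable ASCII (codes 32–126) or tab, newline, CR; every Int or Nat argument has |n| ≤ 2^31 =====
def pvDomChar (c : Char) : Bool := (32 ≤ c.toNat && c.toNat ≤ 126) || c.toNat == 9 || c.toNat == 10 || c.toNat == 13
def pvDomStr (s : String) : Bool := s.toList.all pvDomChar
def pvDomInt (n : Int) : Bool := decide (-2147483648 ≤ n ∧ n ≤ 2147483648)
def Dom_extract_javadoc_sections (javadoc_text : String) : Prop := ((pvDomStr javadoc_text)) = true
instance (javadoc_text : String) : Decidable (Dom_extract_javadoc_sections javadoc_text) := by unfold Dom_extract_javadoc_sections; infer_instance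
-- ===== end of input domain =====

-- B re-decomposes A's single per-line state machine into two passes: chop cleaned lines into an
-- explicit (kind, lines) segment list, then fold that list into the three outputs (objective: alternative).


-- ===== PORT A =====
-- line.lstrip(" *\t/") strips exactly the leading chars from that set: List.dropWhile on the char set (exact).
def pvLstripTags (line : List Char) : List Char :=
  line.dropWhile (fun c => [' ', '*', '\t', '/'].contains c)

-- " ".join(block).strip()
def pvJStrip (block : List (List Char)) : List Char :=
  PySem.Chars.strip (PySem.Chars.join [' '] block)

-- A's loop state: (summary_lines, param_blocks, return_blocks, current_section, current_param, current_return, ignoring_throws)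
def pvStepA
    (st : List (List Char) × List (List (List Char)) × List (List (List Char)) × String × List (List Char) × List (List Char) × Bool)
    (line : List Char) :
    List (List Char) × List (List (List Char)) × List (List (List Char)) × String × List (List Char) × List (List Char) × Bool :=
  match st with
  | (sum, pb, rb, sec, cp, cr, ign) =>
    if PySem.Chars.startswith line "@param".toList then
      let pb := if sec = "param" ∧ cp ≠ [] then pb ++ [cp] else pb
      let rb := if sec = "return" ∧ cr ≠ [] then rb ++ [cr] else rb
      (sum, pb, rb, "param", [PySem.Chars.strip (PySem.Chars.replace line "@param".toList [])], cr, false)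
    else if PySem.Chars.startswith line "@return".toList then
      let pb := if sec = "param" ∧ cp ≠ [] then pb ++ [cp] else pb
      let rb := if sec = "return" ∧ cr ≠ [] then rb ++ [cr] else rb
      (sum, pb, rb, "return", cp, [PySem.Chars.strip (PySem.Chars.replace line "@return".toList [])], false)
    else if PySem.Chars.startswith line "@throws".toList then
      let pb := if sec = "param" ∧ cp ≠ [] then pb ++ [cp] else pb
      let rb := if sec = "return" ∧ cr ≠ [] then rb ++ [cr] else rb
      (sum, pb, rb, "throws", cp, cr, true)
    else
      if ign then (sum, pb, rb, sec, cp, cr, ign)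
      else if sec = "summary" then (sum ++ [line], pb, rb, sec, cp, cr, ign)
      else if sec = "param" then (sum, pb, rb, sec, cp ++ [line], cr, ign)
      else if sec = "return" then (sum, pb, rb, sec, cp, cr ++ [line], ign)
      else (sum, pb, rb, sec, cp, cr, ign)

-- the code after A's loop (final block flush + joins), on char lists
def pvFinishA
    (st : List (List Char) × List (List (List Char)) × List (List (List Char)) × String × List (List Char) × List (List Char) × Bool) :
    List Char × List (List Char) × List (List Char) :=
  match st with
  | (sum, pb, rb, sec, cp, cr, _) =>
    let pb := if sec = "param" ∧ cp ≠ [] then pb ++ [cp] else pb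
    let rb := if sec = "return" ∧ cr ≠ [] then rb ++ [cr] else rb
    (pvJStrip sum, pb.map pvJStrip, rb.map pvJStrip)

def extract_javadoc_sections (javadoc_text : String) : String × List String × List String :=
  let lines := PySem.Chars.splitOn javadoc_text.toList ['\n']
  let cleaned := lines.foldl (fun acc line => acc ++ [pvLstripTags line]) []
  let out := pvFinishA (cleaned.foldl pvStepA ([], [], [], "summary", [], [], false))
  (String.ofList out.1, out.2.1.map String.ofList, out.2.2.map String.ofList)

-- ===== PORT B =====
-- segments[-1][1].append(line)
def pvAppendLast : List (String × List (List Char)) → List Char → List (String × List (List Char))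
  | [], _ => []
  | [(k, ls)], line => [(k, ls ++ [line])]
  | s :: r :: rest, line => s :: pvAppendLast (r :: rest) line

-- pass 1 step: start a new tagged segment, or append the line to the open (last) one
def pvStepB (segs : List (String × List (List Char))) (line : List Char) : List (String × List (List Char)) :=
  if PySem.Chars.startswith line "@param".toList then
    segs ++ [("param", [PySem.Chars.strip (PySem.Chars.replace line "@param".toList [])])]
  else if PySem.Chars.startswith line "@return".toList then
    segs ++ [("return", [PySem.Chars.strip (PySem.Chars.replace line "@return".toList [])])]
  else if PySem.Chars.startswith line "@throws".toList then
    segs ++ [("throws", [])]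
  else pvAppendLast segs line

-- pass 2 step: fold one segment into (summary_text, param_texts, return_texts); throws segments are dropped
def pvStepP (st : List Char × List (List Char) × List (List Char)) (seg : String × List (List Char)) :
    List Char × List (List Char) × List (List Char) :=
  let text := pvJStrip seg.2
  if seg.1 = "summary" then (text, st.2.1, st.2.2)
  else if seg.1 = "param" then (st.1, st.2.1 ++ [text], st.2.2)
  else if seg.1 = "return" then (st.1, st.2.1, st.2.2 ++ [text])
  else st

def extract_javadoc_sections_alt (javadoc_text : String) : String × List String × List String :=
  let cleaned := (PySem.Chars.splitOn javadoc_text.toList ['\n']).map pvLstripTags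
  let segs := cleaned.foldl pvStepB [("summary", [])]
  let out := segs.foldl pvStepP ([], [], [])
  (String.ofList out.1, out.2.1.map String.ofList, out.2.2.map String.ofList)

-- ===== PRECONDITION & SPEC =====
def Spec_extract_javadoc_sections (javadoc_text : String) (out : String × List String × List String) : Prop := out = extract_javadoc_sections_alt javadoc_text
instance (javadoc_text : String) (out : String × List String × List String) : Decidable (Spec_extract_javadoc_sections javadoc_text out) := by unfold Spec_extract_javadoc_sections; infer_instance

-- ===== CLAIM (what is proved, stated in full; the proofs are below) =====
def Claim_equal_extract_javadoc_sections : Prop := ∀ (javadoc_text : String), Dom_extract_javadoc_sections javadoc_text → Spec_extract_javadoc_sections javadoc_text (extract_javadoc_sections javadoc_text)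

-- ===== LEMMAS AND PROOFS =====

lemma pvAppendLast_ne {s : List (String × List (List Char))} (h : s ≠ []) (line : List Char) :
    pvAppendLast s line ≠ [] := by
  match s with
  | [(k, ls)] => simp [pvAppendLast]
  | a :: b :: rest => simp [pvAppendLast]

lemma pvAppendLast_front (front : List (String × List (List Char))) {s : List (String × List (List Char))}
    (h : s ≠ []) (line : List Char) :
    pvAppendLast (front ++ s) line = front ++ pvAppendLast s line := by
  induction front with
  | nil => rfl
  | cons a front ih =>
    cases hfs : front ++ s with
    | nil => exact absurd (List.append_eq_nil_iff.mp hfs).2 h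
    | cons b rest =>
      simp only [List.cons_append, hfs, pvAppendLast]
      rw [← hfs, ih]

lemma pvStepB_ne {s : List (String × List (List Char))} (h : s ≠ []) (line : List Char) :
    pvStepB s line ≠ [] := by
  unfold pvStepB
  split_ifs <;> simp [pvAppendLast_ne h]

lemma pvStepB_front (front : List (String × List (List Char))) {s : List (String × List (List Char))}
    (h : s ≠ []) (line : List Char) :
    pvStepB (front ++ s) line = front ++ pvStepB s line := by
  unfold pvStepB
  split_ifs <;> simp [List.append_assoc, pvAppendLast_front front h]

lemma pvFoldB_front (ls : List (List Char)) (front : List (String × List (List Char)))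
    {s : List (String × List (List Char))} (h : s ≠ []) :
    List.foldl pvStepB (front ++ s) ls = front ++ List.foldl pvStepB s ls := by
  induction ls generalizing s with
  | nil => rfl
  | cons line rest ih =>
    simp only [List.foldl_cons, pvStepB_front front h, ih (pvStepB_ne h line)]

-- the coupling between A's loop state and B's open (last) segment + pass-2 state
def pvInv (sum : List (List Char)) (pb rb : List (List (List Char))) (sec : String)
    (cp cr : List (List Char)) (ign : Bool) (S : List Char) (ps rs : List (List Char))
    (k : String) (cur : List (List Char)) : Prop :=
  (sec = "summary" ∧ ign = false ∧ pb = [] ∧ rb = [] ∧ ps = [] ∧ rs = [] ∧ k = "summary" ∧ cur = sum)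
  ∨ (sec = "param" ∧ ign = false ∧ cp ≠ [] ∧ k = "param" ∧ cur = cp ∧ S = pvJStrip sum ∧ ps = pb.map pvJStrip ∧ rs = rb.map pvJStrip)
  ∨ (sec = "return" ∧ ign = false ∧ cr ≠ [] ∧ k = "return" ∧ cur = cr ∧ S = pvJStrip sum ∧ ps = pb.map pvJStrip ∧ rs = rb.map pvJStrip)
  ∨ (sec = "throws" ∧ ign = true ∧ k = "throws" ∧ S = pvJStrip sum ∧ ps = pb.map pvJStrip ∧ rs = rb.map pvJStrip)

lemma pvMain (ls : List (List Char)) (sum : List (List Char)) (pb rb : List (List (List Char)))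
    (sec : String) (cp cr : List (List Char)) (ign : Bool) (S : List Char)
    (ps rs : List (List Char)) (k : String) (cur : List (List Char))
    (hinv : pvInv sum pb rb sec cp cr ign S ps rs k cur) :
    pvFinishA (ls.foldl pvStepA (sum, pb, rb, sec, cp, cr, ign))
      = List.foldl pvStepP (S, ps, rs) (List.foldl pvStepB [(k, cur)] ls) := by
  induction ls generalizing sum pb rb sec cp cr ign S ps rs k cur with
  | nil =>
    rcases hinv with ⟨h1,h2,h3,h4,h5,h6,h7,h8⟩ | ⟨h1,h2,h3,h4,h5,h6,h7,h8⟩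
      | ⟨h1,h2,h3,h4,h5,h6,h7,h8⟩ | ⟨h1,h2,h3,h4,h5,h6⟩ <;>
      subst_vars <;> simp [pvFinishA, pvStepP, *]
  | cons line rest ih =>
    simp only [List.foldl_cons]
    by_cases hp : PySem.Chars.startswith line "@param".toList
    · rw [show pvStepB [(k, cur)] line
          = [(k, cur)] ++ [("param", [PySem.Chars.strip (PySem.Chars.replace line "@param".toList [])])] from by
        unfold pvStepB; rw [if_pos hp],
        pvFoldB_front rest [(k, cur)] (by simp), List.foldl_append]
      simp only [List.foldl_cons, List.foldl_nil]
      rcases hinv with ⟨h1,h2,h3,h4,h5,h6,h7,h8⟩ | ⟨h1,h2,h3,h4,h5,h6,h7,h8⟩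
        | ⟨h1,h2,h3,h4,h5,h6,h7,h8⟩ | ⟨h1,h2,h3,h4,h5,h6⟩ <;> subst_vars <;>
        simp only [pvStepA, hp, if_true] <;>
        (apply ih; simp [pvInv, pvJStrip, *])
    · by_cases hr : PySem.Chars.startswith line "@return".toList
      · rw [show pvStepB [(k, cur)] line
            = [(k, cur)] ++ [("return", [PySem.Chars.strip (PySem.Chars.replace line "@return".toList [])])] from by
          unfold pvStepB; rw [if_neg hp, if_pos hr],
          pvFoldB_front rest [(k, cur)] (by simp), List.foldl_append]
        simp only [List.foldl_cons, List.foldl_nil]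
        rcases hinv with ⟨h1,h2,h3,h4,h5,h6,h7,h8⟩ | ⟨h1,h2,h3,h4,h5,h6,h7,h8⟩
          | ⟨h1,h2,h3,h4,h5,h6,h7,h8⟩ | ⟨h1,h2,h3,h4,h5,h6⟩ <;> subst_vars <;>
          simp only [pvStepA, hp, hr, if_true, Bool.false_eq_true, if_false] <;>
          (apply ih; simp [pvInv, pvJStrip, *])
      · by_cases ht : PySem.Chars.startswith line "@throws".toList
        · rw [show pvStepB [(k, cur)] line = [(k, cur)] ++ [("throws", [])] from by
            unfold pvStepB; rw [if_neg hp, if_neg hr, if_pos ht],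
            pvFoldB_front rest [(k, cur)] (by simp), List.foldl_append]
          simp only [List.foldl_cons, List.foldl_nil]
          rcases hinv with ⟨h1,h2,h3,h4,h5,h6,h7,h8⟩ | ⟨h1,h2,h3,h4,h5,h6,h7,h8⟩
            | ⟨h1,h2,h3,h4,h5,h6,h7,h8⟩ | ⟨h1,h2,h3,h4,h5,h6⟩ <;> subst_vars <;>
            simp only [pvStepA, hp, hr, ht, if_true, Bool.false_eq_true, if_false] <;>
            (apply ih; simp [pvInv, pvJStrip, *])
        · rw [show pvStepB [(k, cur)] line = [(k, cur ++ [line])] from by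
            unfold pvStepB; rw [if_neg hp, if_neg hr, if_neg ht]; rfl]
          rcases hinv with ⟨h1,h2,h3,h4,h5,h6,h7,h8⟩ | ⟨h1,h2,h3,h4,h5,h6,h7,h8⟩
            | ⟨h1,h2,h3,h4,h5,h6,h7,h8⟩ | ⟨h1,h2,h3,h4,h5,h6⟩ <;> subst_vars <;>
            simp only [pvStepA, hp, hr, ht, Bool.false_eq_true, if_false] <;>
            (apply ih; simp [pvInv, pvJStrip, *])

-- ===== VERDICT (by name: the statement is the Claim_ definition above) =====
theorem extract_javadoc_sections_spec : Claim_equal_extract_javadoc_sections := by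
  intro t _
  unfold Spec_extract_javadoc_sections
  show (let lines := PySem.Chars.splitOn t.toList ['\n']
        let cleaned := lines.foldl (fun acc line => acc ++ [pvLstripTags line]) []
        let out := pvFinishA (cleaned.foldl pvStepA ([], [], [], "summary", [], [], false))
        (String.ofList out.1, out.2.1.map String.ofList, out.2.2.map String.ofList)) = _
  simp only [PySem.List.foldl_append_singleton_eq_map]
  rw [pvMain _ [] [] [] "summary" [] [] false [] [] [] "summary" [] (by unfold pvInv; simp)]
  rfl
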